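-- pv_equiv track=rewrite | github.com/SoerenToennesen/algorithms-practice | CodilityTests/Lesson10_PrimeAndCompositeNumbers/2Medium_Peaks.py | solution
-- ===== SOURCE A (Python) =====
-- from itertools import groupby
--
-- def solution(A):
--     #find indices of peaks
--     start = 0
--     sequence = []
--     for key, group in groupby(A):
--         sequence.append((key, start))
--         start += sum(1 for _ in group)
--     peaks = []
--     for (b, bi), (m, mi), (a, ai) in zip(sequence, sequence[1:], sequence[2:]):
--         if b < m and a < m:
--             peaks.append(mi)
--
--     #calculate second part
--     count = 0
--     i = 1
--     while len(A) // i >= i: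
--         if len(A) % i == 0:
--             slices = len(A) // i
--             peak_in_all_slices = True
--             for j in range(i):
--                 peak_in_slice = False
--                 for k in range(j*slices, j*slices+slices):
--                     if k in peaks:
--                         peak_in_slice = True
--                         break
--                 if not peak_in_slice:
--                     peak_in_all_slices = False
--                     break
--             if peak_in_all_slices:
--                 count += 1
--         i += 1
--     return count
-- ===== SOURCE B (Python) =====
-- def solution(A):
--     n = len(A)
--     # one pass: plateau-start peak indices, in increasing order
--     peaks = []
--     rise = -1
--     i = 1
--     for p, x in zip(A, A[1:]):
--         if x > p:
--             rise = i
--         elif x < p: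
--             if rise >= 0:
--                 peaks.append(rise)
--             rise = -1
--         i += 1
--     ps = set(peaks)
--     # pref[t] = number of peaks at indices < t
--     pref = [0]
--     for t in range(n):
--         pref.append(pref[-1] + (1 if t in ps else 0))
--     count = 0
--     i = 1
--     while i * i <= n:
--         if n % i == 0:
--             s = n // i
--             if all(pref[(j + 1) * s] > pref[j * s] for j in range(i)):
--                 count += 1
--         i += 1
--     return count
-- ===== Notes on version B (the rewrite author's own statement) =====
-- stated objective: faster
-- what changed: A finds peaks with groupby and then, for each candidate block count, scans every index of every block and tests membership in the peak list by a linear 'in'; B finds the plateau peaks in one direct scan over adjacent pairs and precomputes a prefix-sum table of peak counts, so each block is checked in O(1) by comparing two table entries.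
import Mathlib
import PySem

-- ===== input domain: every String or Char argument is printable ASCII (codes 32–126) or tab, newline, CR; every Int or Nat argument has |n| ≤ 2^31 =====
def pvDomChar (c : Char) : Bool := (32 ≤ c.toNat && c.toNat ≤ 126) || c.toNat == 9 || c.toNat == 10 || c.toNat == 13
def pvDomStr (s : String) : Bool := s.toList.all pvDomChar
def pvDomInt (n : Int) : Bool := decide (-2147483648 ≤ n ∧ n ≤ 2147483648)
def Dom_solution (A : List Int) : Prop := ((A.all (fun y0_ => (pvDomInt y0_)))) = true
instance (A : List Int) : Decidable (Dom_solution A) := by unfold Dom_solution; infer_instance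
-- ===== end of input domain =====

-- B replaces A's per-block linear scans over the peak list by a prefix-sum table (peaks found by
-- one direct scan instead of groupby), checking each block in O(1); measurably faster.

-- ===== PORT A =====
-- `for key, group in groupby(A): sequence.append((key, start)); start += len(group)` —
-- exact hand model of itertools.groupby over a list (run value with its start index).
def runsA (l : List Int) (st : Int) : List (Int × Int) :=
  match l with
  | [] => []
  | x :: xs =>
      (x, st) :: runsA (xs.dropWhile (fun y => y == x))
        (st + 1 + ((xs.takeWhile (fun y => y == x)).length : Int))
  termination_by l.length
  decreasing_by
    simp only [List.length_cons]
    exact Nat.lt_succ_of_le (List.length_dropWhile_le _ _)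

-- `for (b,bi),(m,mi),(a,ai) in zip(sequence, sequence[1:], sequence[2:]): if b < m and a < m: peaks.append(mi)`
def peaksA (seq : List (Int × Int)) : List Int :=
  (seq.zip ((PySem.List.slice seq (some 1) none).zip (PySem.List.slice seq (some 2) none))).foldl
    (fun acc t => if t.1.1 < t.2.1.1 ∧ t.2.2.1 < t.2.1.1 then acc ++ [t.2.1.2] else acc) []

-- the `while len(A) // i >= i:` loop; Python's local `slices = len(A) // i` is written out at each
-- use; the two inner for-loops with `break` are `.all` / `.any`; fuel (= len(A)+1) strictly exceeds
-- the number of iterations, since the loop stops once i > len(A)//i.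
def whileA (n : Int) (peaks : List Int) : Nat → Int → Int → Int
  | 0, _, count => count
  | fuel+1, i, count =>
      if i ≤ PySem.Int.floordiv n i then
        whileA n peaks fuel (i+1)
          (if PySem.Int.mod n i = 0 then
            (if (PySem.List.pyRange 0 i).all (fun j =>
                  (PySem.List.pyRange (j * PySem.Int.floordiv n i)
                      (j * PySem.Int.floordiv n i + PySem.Int.floordiv n i)).any
                    (fun k => peaks.contains k))
             then count + 1 else count)
           else count)
      else count

def solution (A : List Int) : Int :=
  let seq := runsA A 0
  let peaks := peaksA seq
  whileA (PySem.List.len A) peaks (A.length + 1) 1 0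

-- ===== PORT B =====
-- body of `for p, x in zip(A, A[1:])` of Source B; state = (peaks, rise, i)
def scanStep (st : List Int × Int × Int) (px : Int × Int) : List Int × Int × Int :=
  if px.2 > px.1 then (st.1, st.2.2, st.2.2 + 1)
  else if px.2 < px.1 then
    ((if st.2.1 ≥ 0 then st.1 ++ [st.2.1] else st.1), -1, st.2.2 + 1)
  else (st.1, st.2.1, st.2.2 + 1)

-- body of `for t in range(n): pref.append(pref[-1] + (1 if t in ps else 0))`
def prefStep (ps : PySem.Set Int) (pref : List Int) (t : Int) : List Int :=
  pref ++ [PySem.List.pyGetD pref (-1) 0 + (if PySem.Set.contains ps t then 1 else 0)]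

-- the `while i * i <= n:` loop of Source B (fuel as in whileA; Python's `s = n // i` written out;
-- pref[(j+1)*s] / pref[j*s] are in range, so pyGetD's default is never used)
def whileB (n : Int) (pref : List Int) : Nat → Int → Int → Int
  | 0, _, count => count
  | fuel+1, i, count =>
      if i * i ≤ n then
        whileB n pref fuel (i+1)
          (if PySem.Int.mod n i = 0 then
            (if (PySem.List.pyRange 0 i).all (fun j =>
                  PySem.List.pyGetD pref ((j+1) * PySem.Int.floordiv n i) 0
                    > PySem.List.pyGetD pref (j * PySem.Int.floordiv n i) 0)
             then count + 1 else count)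
           else count)
      else count

def solution_alt (A : List Int) : Int :=
  let n : Int := PySem.List.len A
  let sc := (A.zip (PySem.List.slice A (some 1) none)).foldl scanStep ([], -1, 1)
  let ps : PySem.Set Int := PySem.Set.ofList sc.1
  let pref := (PySem.List.pyRange 0 n).foldl (prefStep ps) [0]
  whileB n pref (A.length + 1) 1 0

-- ===== PRECONDITION & SPEC =====
def Spec_solution (A : List Int) (out : Int) : Prop := out = solution_alt A
instance (A : List Int) (out : Int) : Decidable (Spec_solution A out) := by unfold Spec_solution; infer_instance

-- ===== CLAIM (what is proved, stated in full; the proofs are below) =====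
def Claim_equal_solution : Prop := ∀ (A : List Int), Dom_solution A → Spec_solution A (solution A)

-- ===== LEMMAS AND PROOFS =====

-- consecutive pairs zip(A, A[1:])
def pairsOf : List Int → List (Int × Int)
  | x :: y :: rest => (x, y) :: pairsOf (y :: rest)
  | _ => []

lemma zip_tail_eq_pairsOf (A : List Int) : A.zip A.tail = pairsOf A := by
  fun_induction pairsOf A with
  | case1 x y rest ih => simpa using ih
  | case2 l h =>
      cases l with
      | nil => rfl
      | cons x xs =>
          cases xs with
          | nil => rfl
          | cons y r => exact absurd rfl (h x y r)

-- the peak indices B's scan emits, as a recursion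
def emitted : List (Int × Int) → Int → Int → List Int
  | [], _, _ => []
  | (p, x) :: rest, i, rise =>
      if x > p then emitted rest (i+1) i
      else if x < p then (if rise ≥ 0 then [rise] else []) ++ emitted rest (i+1) (-1)
      else emitted rest (i+1) rise

lemma scan_fold (l : List (Int × Int)) :
    ∀ (acc : List Int) (r i : Int),
      (l.foldl scanStep (acc, r, i)).1 = acc ++ emitted l i r := by
  induction l with
  | nil => intro acc r i; simp [emitted]
  | cons px rest ih =>
      intro acc r i
      obtain ⟨p, x⟩ := px
      simp only [List.foldl_cons, scanStep, emitted]
      split_ifs <;> simp [ih]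

-- peaks extracted from the run list: plain triple recursion …
def pkR : List (Int × Int) → List Int
  | (b, _) :: (m, mi) :: (a, ai) :: rest =>
      (if b < m ∧ a < m then [mi] else []) ++ pkR ((m, mi) :: (a, ai) :: rest)
  | _ => []

-- … and the same with an explicit "previous run is lower" flag
def pkF : Bool → List (Int × Int) → List Int
  | fl, (m, mi) :: (a, ai) :: rest =>
      (if fl ∧ a < m then [mi] else []) ++ pkF (decide (m < a)) ((a, ai) :: rest)
  | _, _ => []

lemma zip3_cons (s1 s2 s3 : Int × Int) (rest : List (Int × Int)) :
    ((s1::s2::s3::rest).zip (((s1::s2::s3::rest).drop 1).zip ((s1::s2::s3::rest).drop 2)))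
      = (s1,(s2,s3)) :: ((s2::s3::rest).zip (((s2::s3::rest).drop 1).zip ((s2::s3::rest).drop 2))) := rfl

lemma peaksA_eq_pkR (seq : List (Int × Int)) : peaksA seq = pkR seq := by
  have key : ∀ (s : List (Int × Int)) (acc : List Int),
      (s.zip ((s.drop 1).zip (s.drop 2))).foldl
        (fun acc t => if t.1.1 < t.2.1.1 ∧ t.2.2.1 < t.2.1.1 then acc ++ [t.2.1.2] else acc) acc
        = acc ++ pkR s := by
    intro s
    induction s with
    | nil => intro acc; simp [pkR]
    | cons x t ih =>
        intro acc
        obtain ⟨b, bi⟩ := x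
        cases t with
        | nil => simp [pkR]
        | cons y u =>
            obtain ⟨m, mi⟩ := y
            cases u with
            | nil => simp [pkR]
            | cons z r =>
                obtain ⟨a, ai⟩ := z
                rw [zip3_cons, List.foldl_cons, ih]
                conv_rhs => rw [pkR]
                split_ifs with h <;> simp
  unfold peaksA
  rw [PySem.List.slice_from_one, PySem.List.slice_from seq (by norm_num : (0:Int) ≤ 2),
    ← List.drop_one]
  have h2 : (2:Int).toNat = 2 := rfl
  rw [h2]
  simpa using key seq []

lemma pkR_pair (rest : List (Int × Int)) :
    ∀ (b bi m mi : Int),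
      pkR ((b, bi) :: (m, mi) :: rest) = pkF (decide (b < m)) ((m, mi) :: rest) := by
  induction rest with
  | nil => intro b bi m mi; simp [pkR, pkF]
  | cons a rest ih =>
      intro b bi m mi
      obtain ⟨av, ai⟩ := a
      simp only [pkR, pkF, ih]
      by_cases h : b < m <;> simp [h]

lemma pkR_eq_pkF (seq : List (Int × Int)) : pkR seq = pkF false seq := by
  match seq with
  | [] => rfl
  | [x] => rfl
  | (b, bi) :: (m, mi) :: rest =>
      rw [pkR_pair]
      simp [pkF]

-- THE MAIN LEMMA: B's single scan emits exactly the plateau-peak starts that A reads off the run list.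
lemma emitted_eq_pkF (ys : List Int) :
    ∀ (y i cur r : Int), 0 ≤ i → 0 ≤ cur → (r = -1 ∨ r = cur) →
      emitted (pairsOf (y :: ys)) i r
        = pkF (decide (r ≥ 0))
            ((y, cur) :: runsA (ys.dropWhile (fun z => z == y))
              (i + ((ys.takeWhile (fun z => z == y)).length : Int))) := by
  induction ys with
  | nil =>
      intro y i cur r hi hc hr
      simp [pairsOf, emitted, runsA, pkF]
  | cons w ys' ih =>
      intro y i cur r hi hc hr
      rcases lt_trichotomy y w with hlt | heq | hgt
      · -- rise: w > y
        have hne : (w == y) = false := by simp; omega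
        have hrw : emitted (pairsOf (y :: w :: ys')) i r
            = emitted (pairsOf (w :: ys')) (i+1) i := by
          simp [pairsOf, emitted, hlt]
        rw [hrw, ih w (i+1) i i (by omega) hi (Or.inr rfl)]
        rw [List.takeWhile_cons_of_neg (by simp [hne]), List.dropWhile_cons_of_neg (by simp [hne])]
        rw [show ((([] : List Int).length : Int)) = 0 from rfl, add_zero, runsA]
        rw [show pkF (decide (r ≥ 0))
              ((y, cur) :: (w, i) :: runsA (List.dropWhile (fun z => z == w) ys')
                (i + 1 + ((List.takeWhile (fun z => z == w) ys').length : Int)))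
            = (if (decide (r ≥ 0) : Bool) ∧ w < y then [cur] else [])
              ++ pkF (decide (y < w)) ((w, i) :: runsA (List.dropWhile (fun z => z == w) ys')
                (i + 1 + ((List.takeWhile (fun z => z == w) ys').length : Int))) from by rw [pkF]]
        rw [if_neg (by rintro ⟨_, h2⟩; omega)]
        rw [decide_eq_true hlt, decide_eq_true (by omega : (i:Int) ≥ 0)]
        simp
      · -- plateau: w = y
        subst heq
        have hrw : emitted (pairsOf (y :: y :: ys')) i r
            = emitted (pairsOf (y :: ys')) (i+1) r := by
          simp [pairsOf, emitted]
        rw [hrw, ih y (i+1) cur r (by omega) hc hr]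
        rw [List.takeWhile_cons_of_pos (by simp), List.dropWhile_cons_of_pos (by simp)]
        rw [List.length_cons]
        rw [show ((((List.takeWhile (fun z => z == y) ys').length + 1 : Nat)) : Int)
            = (i + ((List.takeWhile (fun z => z == y) ys').length : Int) + 1 - i) from by
          push_cast; ring]
        rw [show i + (i + ((List.takeWhile (fun z => z == y) ys').length : Int) + 1 - i)
            = i + 1 + ((List.takeWhile (fun z => z == y) ys').length : Int) from by ring]
      · -- fall: w < y
        have hne : (w == y) = false := by simp; omega
        have hrw : emitted (pairsOf (y :: w :: ys')) i r
            = (if r ≥ 0 then [r] else []) ++ emitted (pairsOf (w :: ys')) (i+1) (-1) := by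
          simp [pairsOf, emitted, hgt, show ¬ (y < w) by omega]
        rw [hrw, ih w (i+1) i (-1) (by omega) hi (Or.inl rfl)]
        rw [List.takeWhile_cons_of_neg (by simp [hne]), List.dropWhile_cons_of_neg (by simp [hne])]
        rw [show ((([] : List Int).length : Int)) = 0 from rfl, add_zero, runsA]
        rw [show pkF (decide (r ≥ 0))
              ((y, cur) :: (w, i) :: runsA (List.dropWhile (fun z => z == w) ys')
                (i + 1 + ((List.takeWhile (fun z => z == w) ys').length : Int)))
            = (if (decide (r ≥ 0) : Bool) ∧ w < y then [cur] else [])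
              ++ pkF (decide (y < w)) ((w, i) :: runsA (List.dropWhile (fun z => z == w) ys')
                (i + 1 + ((List.takeWhile (fun z => z == w) ys').length : Int)))  from by rw [pkF]]
        rw [show (decide (y < w)) = decide ((-1:Int) ≥ 0) from by simp; omega]
        congr 1
        rcases hr with hr | hr
        · subst hr; simp
        · subst hr
          rw [if_pos hc, if_pos]
          simp [hgt, hc]

-- nothing is ever emitted with a negative index
lemma emitted_nonneg (l : List (Int × Int)) :
    ∀ (i r p : Int), p ∈ emitted l i r → 0 ≤ p := by
  induction l with
  | nil => intro i r p h; simp [emitted] at h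
  | cons px rest ih =>
      intro i r p h
      obtain ⟨q, x⟩ := px
      simp only [emitted] at h
      by_cases h1 : x > q
      · rw [if_pos h1] at h
        exact ih _ _ _ h
      · rw [if_neg h1] at h
        by_cases h2 : x < q
        · rw [if_pos h2] at h
          rcases List.mem_append.mp h with h | h
          · by_cases hr : r ≥ 0
            · rw [if_pos hr] at h; simp at h; omega
            · rw [if_neg hr] at h; simp at h
          · exact ih _ _ _ h
        · rw [if_neg h2] at h
          exact ih _ _ _ h

-- B's scanned peak list equals A's groupby peak list
lemma peaks_eq (A : List Int) :
    ((A.zip (PySem.List.slice A (some 1) none)).foldl scanStep ([], -1, 1)).1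
      = peaksA (runsA A 0) := by
  rw [PySem.List.slice_from_one, zip_tail_eq_pairsOf, scan_fold, List.nil_append,
    peaksA_eq_pkR, pkR_eq_pkF]
  cases A with
  | nil => simp [pairsOf, emitted, runsA, pkF]
  | cons y ys =>
      rw [emitted_eq_pkF ys y 1 0 (-1) (by norm_num) le_rfl (Or.inl rfl)]
      rw [runsA]
      norm_num

-- prefix-count function: pref[t] = #{p ∈ ps | p < t}
def cntF (ps : List Int) (t : Nat) : Int := (ps.countP (fun p => decide (p < (t : Int))) : Int)

lemma countP_lt_succ (l : List Int) (hnd : l.Nodup) (m : Nat) :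
    (l.countP (fun p => decide (p < ((m : Int) + 1))) : Int)
      = (l.countP (fun p => decide (p < (m : Int))) : Int)
        + (if (m : Int) ∈ l then 1 else 0) := by
  induction l with
  | nil => simp
  | cons a l ih =>
      obtain ⟨hna, hnd'⟩ := List.nodup_cons.mp hnd
      have ih' := ih hnd'
      rcases lt_trichotomy a (m : Int) with h | h | h
      · have d1 : decide (a < (m:Int)+1) = true := by simp; omega
        have d2 : decide (a < (m:Int)) = true := decide_eq_true h
        have hm : ((m:Int) ∈ a :: l) ↔ ((m:Int) ∈ l) := by
          rw [List.mem_cons]; simp [show ¬ ((m:Int) = a) by omega]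
        rw [List.countP_cons, List.countP_cons, d1, d2]
        rw [if_congr hm rfl rfl]
        push_cast
        omega
      · have d1 : decide (a < (m:Int)+1) = true := by simp; omega
        have d2 : decide (a < (m:Int)) = false := by simp; omega
        have hml : (m:Int) ∉ l := by rw [← h]; exact hna
        have hm : ((m:Int) ∈ a :: l) := by rw [List.mem_cons]; left; omega
        rw [List.countP_cons, List.countP_cons, d1, d2, if_pos hm]
        simp only [show (if false = true then 1 else 0) = 0 from rfl]
        push_cast
        rw [ih', if_neg hml]
      · have d1 : decide (a < (m:Int)+1) = false := by simp; omega
        have d2 : decide (a < (m:Int)) = false := by simp; omega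
        have hm : ((m:Int) ∈ a :: l) ↔ ((m:Int) ∈ l) := by
          rw [List.mem_cons]; simp [show ¬ ((m:Int) = a) by omega]
        rw [List.countP_cons, List.countP_cons, d1, d2]
        rw [if_congr hm rfl rfl]
        push_cast
        omega

lemma pref_eq (ps : List Int) (hnd : ps.Nodup) (hpos : ∀ p ∈ ps, 0 ≤ p) (N : Nat) :
    (PySem.List.pyRange 0 (N : Int)).foldl (prefStep ps) [0]
      = (List.range (N+1)).map (cntF ps) := by
  induction N with
  | zero =>
      rw [show ((0:Nat):Int) = 0 from rfl, PySem.List.pyRange_one_eq_nil le_rfl]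
      have h0 : cntF ps 0 = 0 := by
        unfold cntF
        rw [List.countP_eq_zero.mpr]
        · rfl
        · intro p hp
          have := hpos p hp
          simp only [Nat.cast_zero]
          simp
          omega
      simp [List.range_one, h0]
  | succ n ih =>
      rw [show ((n+1:Nat):Int) = ((n:Int))+1 from by push_cast; ring]
      rw [PySem.List.pyRange_one_succ_right (by positivity), List.foldl_append, ih]
      simp only [List.foldl_cons, List.foldl_nil]
      unfold prefStep
      rw [show List.range (n+1) = List.range n ++ [n] from List.range_succ, List.map_append]
      simp only [List.map_cons, List.map_nil]
      rw [PySem.List.pyGetD_neg_one_append_singleton]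
      have hfin : cntF ps n + (if PySem.Set.contains ps ((n:Int)) then (1:Int) else 0)
          = cntF ps (n+1) := by
        have step : cntF ps (n+1) = cntF ps n + (if (n:Int) ∈ ps then 1 else 0) := by
          unfold cntF
          rw [show (((n+1:Nat)) : Int) = ((n:Int))+1 from by push_cast; ring]
          exact countP_lt_succ ps hnd n
        rw [step]
        congr 1
        by_cases hmem : (n:Int) ∈ ps
        · rw [if_pos hmem, if_pos (by rw [PySem.Set.contains_iff]; exact hmem)]
        · rw [if_neg hmem, if_neg (by rw [PySem.Set.contains_iff]; exact hmem)]
      rw [hfin]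
      rw [show List.range (n+1+1) = List.range (n+1) ++ [n+1] from List.range_succ,
        List.map_append]
      rw [show List.range (n+1) = List.range n ++ [n] from List.range_succ, List.map_append]
      simp only [List.map_cons, List.map_nil]

lemma pref_get (ps : List Int) (N : Nat) (t : Int) (h0 : 0 ≤ t) (h1 : t ≤ (N : Int)) :
    PySem.List.pyGetD ((List.range (N+1)).map (cntF ps)) t 0
      = (ps.countP (fun p => decide (p < t)) : Int) := by
  rw [PySem.List.pyGetD_eq_getElem _ _ h0 (by simp; omega)]
  rw [List.getElem_map, List.getElem_range]
  unfold cntF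
  congr 2
  funext p
  rw [Int.toNat_of_nonneg h0]

lemma countP_split (l : List Int) (a b : Int) (hab : a ≤ b) :
    l.countP (fun p => decide (p < b))
      = l.countP (fun p => decide (p < a))
        + l.countP (fun p => decide (a ≤ p) && decide (p < b)) := by
  induction l with
  | nil => simp
  | cons x l ih =>
      rw [List.countP_cons, List.countP_cons, List.countP_cons, ih]
      by_cases hx1 : a ≤ x <;> by_cases hx2 : x < b
      · rw [decide_eq_true hx2, decide_eq_true hx1,
          decide_eq_false (by omega : ¬ x < a)]
        simp
        omega
      · rw [decide_eq_false hx2, decide_eq_true hx1,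
          decide_eq_false (by omega : ¬ x < a)]
        simp
      · rw [decide_eq_true hx2, decide_eq_false hx1,
          decide_eq_true (by omega : x < a)]
        simp
        omega
      · rw [decide_eq_false hx2, decide_eq_false hx1,
          decide_eq_false (by omega : ¬ x < a)]
        simp

-- the block test of A equals the block test of B
lemma block_eq (peaks ps : List Int)
    (hmem : ∀ x : Int, x ∈ ps ↔ x ∈ peaks) (N : Nat) (a s : Int)
    (ha : 0 ≤ a) (hs : 0 ≤ s) (hb : a + s ≤ (N : Int)) :
    ((PySem.List.pyRange a (a + s)).any (fun k => peaks.contains k) = true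
      ↔ PySem.List.pyGetD ((List.range (N+1)).map (cntF ps)) (a + s) 0
          > PySem.List.pyGetD ((List.range (N+1)).map (cntF ps)) a 0) := by
  rw [pref_get ps N (a+s) (by omega) hb, pref_get ps N a ha (by omega)]
  rw [List.any_eq_true]
  have hsplit := countP_split ps a (a + s) (by omega)
  constructor
  · rintro ⟨k, hk, hck⟩
    rw [PySem.List.mem_pyRange_one] at hk
    rw [List.contains_iff_mem] at hck
    have hkps : k ∈ ps := (hmem k).mpr hck
    have hpos : 0 < ps.countP (fun p => decide (a ≤ p) && decide (p < a + s)) := by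
      rw [List.countP_pos_iff]
      exact ⟨k, hkps, by simp; omega⟩
    omega
  · intro hgt
    have hpos : 0 < ps.countP (fun p => decide (a ≤ p) && decide (p < a + s)) := by omega
    rw [List.countP_pos_iff] at hpos
    obtain ⟨p, hp, hcond⟩ := hpos
    simp only [Bool.and_eq_true, decide_eq_true_eq] at hcond
    refine ⟨p, ?_, ?_⟩
    · rw [PySem.List.mem_pyRange_one]; omega
    · rw [List.contains_iff_mem]; exact (hmem p).mp hp

-- the two while-loops march in lockstep
lemma while_eq (N : Nat) (peaks ps : List Int)
    (hmem : ∀ x : Int, x ∈ ps ↔ x ∈ peaks) :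
    ∀ (fuel : Nat) (i count : Int), 1 ≤ i →
      whileA (N : Int) peaks fuel i count
        = whileB (N : Int) ((List.range (N+1)).map (cntF ps)) fuel i count := by
  intro fuel
  induction fuel with
  | zero => intro i count _; rfl
  | succ fuel ih =>
      intro i count hi
      rw [whileA, whileB]
      have hcond : (i ≤ PySem.Int.floordiv (N : Int) i) ↔ (i * i ≤ (N : Int)) :=
        PySem.Int.le_floordiv_iff_mul_le (by omega)
      by_cases hc : i * i ≤ (N : Int)
      · rw [if_pos (hcond.mpr hc), if_pos hc]
        rw [ih (i+1) _ (by omega)]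
        congr 1
        by_cases hm : PySem.Int.mod (N : Int) i = 0
        · rw [if_pos hm, if_pos hm]
          have hs : PySem.Int.floordiv (N : Int) i * i = (N : Int) := by
            have := PySem.Int.floordiv_mul_add_mod (N : Int) i
            omega
          have hs0 : 0 ≤ PySem.Int.floordiv (N : Int) i := by nlinarith [hcond.mpr hc]
          have hall : ((PySem.List.pyRange 0 i).all (fun j =>
                  (PySem.List.pyRange (j * PySem.Int.floordiv (N:Int) i)
                      (j * PySem.Int.floordiv (N:Int) i + PySem.Int.floordiv (N:Int) i)).any
                    (fun k => peaks.contains k)))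
              = ((PySem.List.pyRange 0 i).all (fun j =>
                  decide (PySem.List.pyGetD ((List.range (N+1)).map (cntF ps))
                      ((j+1) * PySem.Int.floordiv (N:Int) i) 0
                    > PySem.List.pyGetD ((List.range (N+1)).map (cntF ps))
                      (j * PySem.Int.floordiv (N:Int) i) 0))) := by
            rw [Bool.eq_iff_iff, List.all_eq_true, List.all_eq_true]
            have hpt : ∀ j : Int, j ∈ PySem.List.pyRange 0 i →
                (((PySem.List.pyRange (j * PySem.Int.floordiv (N:Int) i)
                      (j * PySem.Int.floordiv (N:Int) i + PySem.Int.floordiv (N:Int) i)).any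
                    (fun k => peaks.contains k) = true)
                  ↔ (PySem.List.pyGetD ((List.range (N+1)).map (cntF ps))
                      ((j+1) * PySem.Int.floordiv (N:Int) i) 0
                    > PySem.List.pyGetD ((List.range (N+1)).map (cntF ps))
                      (j * PySem.Int.floordiv (N:Int) i) 0)) := by
              intro j hj
              rw [PySem.List.mem_pyRange_one] at hj
              have hb : j * PySem.Int.floordiv (N:Int) i + PySem.Int.floordiv (N:Int) i
                  ≤ (N : Int) := by
                calc j * PySem.Int.floordiv (N:Int) i + PySem.Int.floordiv (N:Int) i
                    = (j + 1) * PySem.Int.floordiv (N:Int) i := by ring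
                  _ ≤ i * PySem.Int.floordiv (N:Int) i := by
                      apply mul_le_mul_of_nonneg_right (by omega) hs0
                  _ = (N : Int) := by rw [mul_comm]; exact hs
              have := block_eq peaks ps hmem N (j * PySem.Int.floordiv (N:Int) i)
                (PySem.Int.floordiv (N:Int) i)
                (mul_nonneg (by omega) hs0) hs0 hb
              rw [this]
              rw [show (j+1) * PySem.Int.floordiv (N:Int) i
                  = j * PySem.Int.floordiv (N:Int) i + PySem.Int.floordiv (N:Int) i from by ring]
            constructor
            · intro h j hj
              exact decide_eq_true ((hpt j hj).mp (h j hj))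
            · intro h j hj
              exact (hpt j hj).mpr (of_decide_eq_true (h j hj))
          rw [hall]
        · rw [if_neg hm, if_neg hm]
      · rw [if_neg (fun h => hc (hcond.mp h)), if_neg hc]

-- ===== VERDICT (by name: the statement is the Claim_ definition above) =====
theorem solution_spec : Claim_equal_solution := by
  intro A _
  unfold Spec_solution solution solution_alt
  simp only [PySem.List.len_eq]
  rw [peaks_eq]
  have hpos : ∀ p ∈ PySem.Set.ofList (peaksA (runsA A 0)), 0 ≤ p := by
    intro p hp
    rw [PySem.Set.mem_ofList, ← peaks_eq A, PySem.List.slice_from_one,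
      zip_tail_eq_pairsOf, scan_fold, List.nil_append] at hp
    exact emitted_nonneg _ _ _ _ hp
  rw [pref_eq (PySem.Set.ofList (peaksA (runsA A 0))) (PySem.Set.nodup_ofList _) hpos A.length]
  exact while_eq A.length (peaksA (runsA A 0)) (PySem.Set.ofList (peaksA (runsA A 0)))
    (fun x => PySem.Set.mem_ofList _ x) (A.length + 1) 1 0 (by norm_num)
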